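-- pv_equiv track=rewrite | github.com/yknot/adventOfCode | 2017/17_01.py | run_inserts
-- ===== SOURCE A (Python) =====
-- def run_inserts(steps):
--     """run 2017 inserts"""
--     lock = [0]
--     spot = 0
--     for i in range(1, 2018):
--         spot = (steps + spot) % i
--         spot += 1
--         lock.insert(spot, i)
--
--     return lock[lock.index(2017) + 1]
-- ===== SOURCE B (Python) =====
-- def run_inserts(steps):
--     """run 2017 inserts"""
--     buf = [0]
--     for i in range(1, 2018):
--         k = steps % i
--         buf = buf[k:] + buf[:k] + [i]
--     return buf[0]
-- ===== Notes on version B (the rewrite author's own statement) =====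
-- stated objective: alternative
-- what changed: B replaces index arithmetic plus list.insert at a tracked position with rotating the buffer so the current position is always at the end, then appending; the answer is then simply the first element, with no position variable and no final index() scan.
import Mathlib
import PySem

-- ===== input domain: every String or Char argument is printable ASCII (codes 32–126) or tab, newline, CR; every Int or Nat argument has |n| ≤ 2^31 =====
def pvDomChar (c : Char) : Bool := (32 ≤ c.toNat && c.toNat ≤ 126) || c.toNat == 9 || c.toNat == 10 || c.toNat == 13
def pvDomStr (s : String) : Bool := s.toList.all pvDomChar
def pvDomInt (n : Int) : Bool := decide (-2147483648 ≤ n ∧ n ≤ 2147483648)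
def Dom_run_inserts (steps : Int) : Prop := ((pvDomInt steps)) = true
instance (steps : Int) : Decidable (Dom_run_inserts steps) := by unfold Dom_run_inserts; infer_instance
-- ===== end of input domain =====

-- B replaces A's tracked-position arithmetic + list.insert (and the final index() scan) by rotating
-- the buffer so the current element is always last, then appending; same O(n^2) cost, different
-- decomposition ("alternative"). Return-value equivalence; neither program mutates its argument.


-- ===== PORT A =====
def run_inserts (steps : Int) : Int :=
  let st := (PySem.List.pyRange 1 2018 1).foldl
    (fun (st : List Int × Int) i =>
      let spot := PySem.Int.mod (steps + st.2) i
      let spot := spot + 1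
      (PySem.List.insert st.1 spot i, spot))
    ([0], 0)
  let lock := st.1
  match PySem.List.index? lock 2017 with
  | some idx => (PySem.List.pyGet? lock ((idx : Int) + 1)).getD 0   -- none = IndexError, excluded by Pre_
  | none => 0                                                       -- unreachable: 2017 is always inserted

-- ===== PORT B =====
def run_inserts_alt (steps : Int) : Int :=
  let buf := (PySem.List.pyRange 1 2018 1).foldl
    (fun (buf : List Int) i =>
      let k := PySem.Int.mod steps i
      PySem.List.slice buf (some k) none ++ PySem.List.slice buf none (some k) ++ [i])
    [0]
  (PySem.List.pyGet? buf 0).getD 0   -- buf is nonempty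

-- ===== PRECONDITION & SPEC =====
-- A raises IndexError exactly when the final insertion position lands at the end of the
-- 2018-element list (lock[lock.index(2017)+1] then indexes one past the end, e.g. steps = 0).
-- That raising set has no simpler closed form: it is a condition on the input computed by this
-- arithmetic recurrence on the position alone (neither port's list algorithm is run here).
-- pvSpotGo steps d j len s applies the position recurrence for indices j, …, j+len-1 (len ≤ 2^d);
-- the balanced splitting keeps `decide`'s evaluation depth logarithmic, and the two identical
-- if-branches only force the intermediate value during evaluation.
def pvSpotGo (steps : Int) : Nat → Nat → Nat → Int → Int
  | 0, j, len, s => if len = 0 then s else PySem.Int.mod (steps + s) ((j : Int) + 1) + 1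
  | Nat.succ d, j, len, s =>
      if len ≤ 1 then (if len = 0 then s else PySem.Int.mod (steps + s) ((j : Int) + 1) + 1)
      else
        let h := len / 2
        let s1 := pvSpotGo steps d j h s
        if 0 ≤ s1 then pvSpotGo steps d (j + h) (len - h) s1
        else pvSpotGo steps d (j + h) (len - h) s1

def Pre_run_inserts (steps : Int) : Prop := pvSpotGo steps 11 0 2017 0 ≠ 2017
instance (steps : Int) : Decidable (Pre_run_inserts steps) := by unfold Pre_run_inserts; infer_instance
def pvWitness_run_inserts : Int := 3

def Spec_run_inserts (steps : Int) (out : Int) : Prop := out = run_inserts_alt steps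
instance (steps : Int) (out : Int) : Decidable (Spec_run_inserts steps out) := by unfold Spec_run_inserts; infer_instance

-- ===== CLAIM (what is proved, stated in full; the proofs are below) =====
def Claim_equal_run_inserts : Prop := ∀ (steps : Int), Dom_run_inserts steps → Pre_run_inserts steps → Spec_run_inserts steps (run_inserts steps)

-- ===== LEMMAS AND PROOFS =====

-- the position recurrence, without the accumulator (proof-friendly form)
def pvS (steps : Int) : Nat → Int
  | 0 => 0
  | Nat.succ m => PySem.Int.mod (steps + pvS steps m) ((m : Int) + 1) + 1

-- the same recurrence applied linearly to indices j, …, j+len-1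
def pvSeg (steps : Int) : Nat → Nat → Int → Int
  | _, 0, s => s
  | j, Nat.succ l, s => pvSeg steps (j + 1) l (PySem.Int.mod (steps + s) ((j : Int) + 1) + 1)

lemma pvSeg_append (steps : Int) (a : Nat) : ∀ (b j : Nat) (s : Int),
    pvSeg steps j (a + b) s = pvSeg steps (j + a) b (pvSeg steps j a s) := by
  induction a with
  | zero => intro b j s; simp [pvSeg]
  | succ a ih =>
      intro b j s
      have : a + 1 + b = (a + b) + 1 := by omega
      rw [this]
      show pvSeg steps (j + 1) (a + b) _ = _
      rw [ih b (j + 1) _]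
      have : j + 1 + a = j + (a + 1) := by omega
      rw [this]
      rfl

lemma pvSpotGo_eq_pvSeg (steps : Int) : ∀ (d j len : Nat) (s : Int), len ≤ 2 ^ d →
    pvSpotGo steps d j len s = pvSeg steps j len s := by
  intro d
  induction d with
  | zero =>
      intro j len s hlen
      interval_cases len <;> simp [pvSpotGo, pvSeg]
  | succ d ih =>
      intro j len s hlen
      by_cases h1 : len ≤ 1
      · interval_cases len <;> simp [pvSpotGo, pvSeg]
      · have hd : pvSpotGo steps (d + 1) j len s
            = pvSpotGo steps d (j + len / 2) (len - len / 2) (pvSpotGo steps d j (len / 2) s) := by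
          show (if len ≤ 1 then _ else _) = _
          rw [if_neg h1]
          exact ite_self _
        rw [hd, ih j (len / 2) s (by omega), ih (j + len / 2) (len - len / 2) _ (by omega)]
        have hsplit : len = len / 2 + (len - len / 2) := by omega
        conv_rhs => rw [hsplit]
        rw [pvSeg_append]

lemma pvSeg_eq_pvS (steps : Int) (m : Nat) : pvSeg steps 0 m 0 = pvS steps m := by
  induction m with
  | zero => rfl
  | succ m ih =>
      have : pvSeg steps 0 (m + 1) 0 = pvSeg steps (0 + m) 1 (pvSeg steps 0 m 0) :=
        pvSeg_append steps m 1 0 0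
      rw [this, ih]
      simp [pvSeg, pvS]

lemma pvSpotGo_eq_pvS (steps : Int) : pvSpotGo steps 11 0 2017 0 = pvS steps 2017 := by
  rw [pvSpotGo_eq_pvSeg steps 11 0 2017 0 (by norm_num), pvSeg_eq_pvS]

-- A's loop, as a structural recursion on the number of completed iterations.
def pvA (steps : Int) : Nat → List Int × Int
  | 0 => ([0], 0)
  | Nat.succ m =>
      let st := pvA steps m
      let i : Int := (m : Int) + 1
      let spot := PySem.Int.mod (steps + st.2) i + 1
      (PySem.List.insert st.1 spot i, spot)

-- B's loop likewise.
def pvB (steps : Int) : Nat → List Int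
  | 0 => [0]
  | Nat.succ m =>
      let buf := pvB steps m
      let i : Int := (m : Int) + 1
      let k := PySem.Int.mod steps i
      PySem.List.slice buf (some k) none ++ PySem.List.slice buf none (some k) ++ [i]

lemma pvA_fold (steps : Int) (m : Nat) :
    (PySem.List.pyRange 1 ((m : Int) + 1) 1).foldl
      (fun (st : List Int × Int) i =>
        let spot := PySem.Int.mod (steps + st.2) i
        let spot := spot + 1
        (PySem.List.insert st.1 spot i, spot))
      ([0], 0) = pvA steps m := by
  induction m with
  | zero => simp [PySem.List.pyRange_one_eq_nil, pvA]
  | succ m ih =>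
      have h : ((m : Int) + 1) + 1 = ((m + 1 : Nat) : Int) + 1 := by push_cast; ring
      rw [← h, PySem.List.pyRange_one_succ_right (show (1:Int) ≤ (m:Int)+1 by omega),
        List.foldl_append, ih]
      simp [pvA]

lemma pvB_fold (steps : Int) (m : Nat) :
    (PySem.List.pyRange 1 ((m : Int) + 1) 1).foldl
      (fun (buf : List Int) i =>
        let k := PySem.Int.mod steps i
        PySem.List.slice buf (some k) none ++ PySem.List.slice buf none (some k) ++ [i])
      [0] = pvB steps m := by
  induction m with
  | zero => simp [PySem.List.pyRange_one_eq_nil, pvB]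
  | succ m ih =>
      have h : ((m : Int) + 1) + 1 = ((m + 1 : Nat) : Int) + 1 := by push_cast; ring
      rw [← h, PySem.List.pyRange_one_succ_right (show (1:Int) ≤ (m:Int)+1 by omega),
        List.foldl_append, ih]
      simp [pvB]

-- The joint invariant of the two loops: at each step the A-state list has the freshly
-- inserted value at the tracked position, and B's buffer is A's list rotated so that
-- this value sits at the end.
lemma pv_inv (steps : Int) (m : Nat) :
    (pvA steps m).1.length = m + 1 ∧
    (pvA steps m).2 = pvS steps m ∧
    0 ≤ (pvA steps m).2 ∧ (pvA steps m).2.toNat ≤ m ∧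
    (∀ x ∈ (pvA steps m).1, x < (m : Int) + 1) ∧
    PySem.List.index? (pvA steps m).1 (m : Int) = some (pvA steps m).2.toNat ∧
    (pvA steps m).1[0]? = some 0 ∧
    pvB steps m = (pvA steps m).1.rotate ((pvA steps m).2.toNat + 1) := by
  induction m with
  | zero =>
      refine ⟨rfl, rfl, le_refl _, le_refl _, ?_, by simp [pvA], rfl, by simp [pvA, pvB]⟩
      intro x hx; simp [pvA] at hx; omega
  | succ m ih =>
      obtain ⟨h1, h2, h3, h4, h5, h6, h7, h8⟩ := ih
      set L := (pvA steps m).1 with hL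
      set sp := (pvA steps m).2 with hsp
      set i : Int := (m : Int) + 1 with hi
      have hipos : (0 : Int) < i := by omega
      set s' : Int := PySem.Int.mod (steps + sp) i + 1 with hs'
      set p : Nat := s'.toNat with hp
      have hmnn : 0 ≤ PySem.Int.mod (steps + sp) i := PySem.Int.mod_nonneg _ hipos
      have hmlt : PySem.Int.mod (steps + sp) i < i := PySem.Int.mod_lt _ hipos
      have hs'1 : 1 ≤ s' := by omega
      have hs'i : s' ≤ i := by omega
      have hpc : ((p : Nat) : Int) = s' := Int.toNat_of_nonneg (by omega)
      have hp1 : 1 ≤ p := by omega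
      have hpm : p ≤ m + 1 := by omega
      have hA : pvA steps (m + 1) = (PySem.List.insert L s' i, s') := rfl
      have hins : PySem.List.insert L s' i = L.take p ++ i :: L.drop p := by
        rw [← hpc]; exact PySem.List.insert_natCast L p i (by omega)
      have htlen : (L.take p).length = p := by
        simp [List.length_take]; omega
      -- length
      have g1 : (pvA steps (m + 1)).1.length = (m + 1) + 1 := by
        rw [hA, hins]; simp; omega
      -- spot value
      have g2 : (pvA steps (m + 1)).2 = pvS steps (m + 1) := by
        rw [hA]; simp only [pvS]; rw [← h2]
      have g3 : 0 ≤ (pvA steps (m + 1)).2 := by rw [hA]; exact le_trans (by omega) hs'1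
      have g4 : (pvA steps (m + 1)).2.toNat ≤ m + 1 := by rw [hA]; omega
      -- bounds on values
      have g5 : ∀ x ∈ (pvA steps (m + 1)).1, x < ((m + 1 : Nat) : Int) + 1 := by
        rw [hA, hins]
        intro x hx
        have hcast : ((m + 1 : Nat) : Int) + 1 = i + 1 := by push_cast; ring
        rw [hcast]
        rcases List.mem_append.1 hx with hx | hx
        · have := h5 x (List.mem_of_mem_take hx); omega
        · rcases List.mem_cons.1 hx with rfl | hx
          · omega
          · have := h5 x (List.mem_of_mem_drop hx); omega
      -- index? of the value just inserted
      have g6 : PySem.List.index? (pvA steps (m + 1)).1 ((m + 1 : Nat) : Int)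
          = some (pvA steps (m + 1)).2.toNat := by
        rw [hA, hins]
        have hcast : ((m + 1 : Nat) : Int) = i := by push_cast; ring
        rw [hcast]
        exact (PySem.List.index?_eq_some_iff _ _ _).2
          ⟨L.take p, L.drop p, rfl, htlen,
           fun hmem => absurd (h5 i (List.mem_of_mem_take hmem)) (by omega)⟩
      -- head stays 0
      have g7 : (pvA steps (m + 1)).1[0]? = some 0 := by
        rw [hA, hins]
        rw [List.getElem?_append_left (by omega : 0 < (L.take p).length)]
        rw [List.getElem?_take_of_lt (by omega : 0 < p)]
        exact h7
      -- rotation invariant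
      have g8 : pvB steps (m + 1) = (pvA steps (m + 1)).1.rotate ((pvA steps (m + 1)).2.toNat + 1) := by
        have hk : 0 ≤ PySem.Int.mod steps i := PySem.Int.mod_nonneg _ hipos
        have hklt : PySem.Int.mod steps i < i := PySem.Int.mod_lt _ hipos
        set k : Int := PySem.Int.mod steps i with hkdef
        set kn : Nat := k.toNat with hkn
        have hknc : ((kn : Nat) : Int) = k := Int.toNat_of_nonneg hk
        have hbuflen : (pvB steps m).length = m + 1 := by rw [h8]; simp [h1]
        have hstep : pvB steps (m + 1)
            = ((pvB steps m).drop kn ++ (pvB steps m).take kn) ++ [i] := by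
          show PySem.List.slice (pvB steps m) (some k) none
              ++ PySem.List.slice (pvB steps m) none (some k) ++ [i] = _
          rw [PySem.List.slice_from _ hk, PySem.List.slice_to _ hk]
        have hrot1 : (pvB steps m).drop kn ++ (pvB steps m).take kn = (pvB steps m).rotate kn :=
          (List.rotate_eq_drop_append_take (by omega : kn ≤ (pvB steps m).length)).symm
        have hrot2 : (pvB steps m).rotate kn = L.rotate (sp.toNat + 1 + kn) := by
          rw [h8, List.rotate_rotate]
        -- the target side
        have hlock' : (pvA steps (m + 1)).1 = L.take p ++ i :: L.drop p := by rw [hA, hins]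
        have hplus : (pvA steps (m + 1)).2.toNat + 1 = (L.take p).length + 1 := by
          rw [hA, htlen]
        have hrhs : (pvA steps (m + 1)).1.rotate ((pvA steps (m + 1)).2.toNat + 1)
            = (L.rotate p) ++ [i] := by
          rw [hlock', hplus]
          rw [List.rotate_eq_drop_append_take (by simp [htlen, h1]; omega)]
          rw [List.drop_append, List.take_append]
          rw [List.rotate_eq_drop_append_take (by omega : p ≤ L.length)]
          have e1 : List.drop (p + 1) (List.take p L) = [] :=
            List.drop_eq_nil_of_le (by rw [htlen]; omega)
          have e2 : List.take (p + 1) (List.take p L) = List.take p L :=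
            List.take_of_length_le (by rw [htlen]; omega)
          rw [htlen, e1, e2, Nat.add_sub_cancel_left]
          simp
        -- rotation indices agree mod length
        have hmodeq : (sp.toNat + 1 + kn) % L.length = p % L.length := by
          have hLlen : L.length = m + 1 := h1
          have hspc : ((sp.toNat : Nat) : Int) = sp := Int.toNat_of_nonneg h3
          have hie : PySem.Int.mod (steps + sp) i = (steps + sp) % i :=
            PySem.Int.mod_eq_emod_of_pos hipos
          have hke : k = steps % i := PySem.Int.mod_eq_emod_of_pos hipos
          have key : (sp + 1 + k) % i = s' % i := by
            rw [hke, hs', hie]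
            have e1 : (sp + 1 + steps % i) % i = (sp + 1 + steps) % i := by
              conv_rhs => rw [Int.add_emod]
              rw [Int.add_emod (sp + 1) (steps % i), Int.emod_emod_of_dvd _ dvd_rfl]
            have e2 : ((steps + sp) % i + 1) % i = (steps + sp + 1) % i := by
              conv_rhs => rw [Int.add_emod]
              rw [Int.add_emod ((steps + sp) % i) 1, Int.emod_emod_of_dvd _ dvd_rfl]
            rw [e1, e2]; ring_nf
          have key2 : ((sp.toNat : Int) + 1 + (kn : Int)) % ((m : Int) + 1)
              = ((p : Int)) % ((m : Int) + 1) := by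
            rw [hspc, hknc, hpc, ← hi]; exact key
          rw [hLlen]
          exact_mod_cast key2
        rw [hstep, hrot1, hrot2, hrhs]
        congr 1
        rw [← List.rotate_mod, hmodeq, List.rotate_mod]
      exact ⟨g1, g2, g3, g4, g5, g6, g7, g8⟩

-- ===== VERDICT (by name: the statement is the Claim_ definition above) =====
theorem run_inserts_spec : Claim_equal_run_inserts := by
  intro steps _ hpre
  unfold Spec_run_inserts
  obtain ⟨h1, h2, h3, h4, h5, h6, h7, h8⟩ := pv_inv steps 2017
  have hsp : (pvA steps 2017).2 ≠ 2017 := by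
    rw [h2, ← pvSpotGo_eq_pvS]; exact hpre
  have hlt : (pvA steps 2017).2.toNat + 1 < 2018 := by omega
  have hfoldA : run_inserts steps
      = (match PySem.List.index? (pvA steps 2017).1 (2017 : Int) with
         | some idx => (PySem.List.pyGet? (pvA steps 2017).1 ((idx : Int) + 1)).getD 0
         | none => 0) := by
    simp only [run_inserts]
    rw [show (2018 : Int) = ((2017 : Nat) : Int) + 1 by norm_num, pvA_fold]
  have hidx : PySem.List.index? (pvA steps 2017).1 (2017 : Int)
      = some (pvA steps 2017).2.toNat := by exact_mod_cast h6
  have hfoldB : run_inserts_alt steps = (PySem.List.pyGet? (pvB steps 2017) 0).getD 0 := by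
    simp only [run_inserts_alt]
    rw [show (2018 : Int) = ((2017 : Nat) : Int) + 1 by norm_num, pvB_fold]
  rw [hfoldA, hidx]
  rw [hfoldB, h8, PySem.List.pyGet?_zero]
  rw [List.rotate_eq_drop_append_take (by omega : (pvA steps 2017).2.toNat + 1 ≤ (pvA steps 2017).1.length)]
  rw [List.getElem?_append_left (by simp [h1]; omega)]
  rw [List.getElem?_drop]
  show (PySem.List.pyGet? (pvA steps 2017).1 (((pvA steps 2017).2.toNat : Int) + 1)).getD 0 = _
  rw [show ((pvA steps 2017).2.toNat : Int) + 1 = (((pvA steps 2017).2.toNat + 1 : Nat) : Int) by push_cast; ring,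
    PySem.List.pyGet?_natCast]
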